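-- pv_equiv track=rewrite | github.com/palharesf/fcc_daily_challenges | python/2025/12/20251231.py | parse_italics
-- ===== SOURCE A (Python) =====
-- def parse_italics(markdown):
--     result = ""
--     i = 0
--
--     while i < len(markdown):
--         char = markdown[i]
--
--         # Check if current character is a potential opening delimiter
--         if char in ("*", "_"):
--             # Valid opening: no space after (and there must be a next char)
--             if i + 1 < len(markdown) and markdown[i + 1] != " ":
--                 # Look ahead for a matching closing delimiter
--                 j = i + 1
--                 found_closing = False
--
--                 while j < len(markdown):
--                     if markdown[j] == char:
--                         # Check if valid closing (no space before)
--                         if markdown[j - 1] != " ":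
--                             # Found valid closing delimiter
--                             result += "<i>" + markdown[i + 1 : j] + "</i>"
--                             i = j + 1
--                             found_closing = True
--                             break
--                     j += 1
--
--                 if not found_closing:
--                     # No valid closing found, treat as regular character
--                     result += char
--                     i += 1
--             else:
--                 # Invalid opening, treat as regular character
--                 result += char
--                 i += 1
--         else:
--             # Regular character
--             result += char
--             i += 1
--
--     return result
-- ===== SOURCE B (Python) =====
-- def parse_italics(markdown):
--     # Faster: one right-to-left pass precomputes, per delimiter, the next valid
--     # closing index from each position; the main pass then does O(1) lookups.
--     n = len(markdown)
--     nxt = {"*": [n] * (n + 1), "_": [n] * (n + 1)}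
--     for c in ("*", "_"):
--         arr = nxt[c]
--         for j in range(n - 1, 0, -1):
--             arr[j] = j if (markdown[j] == c and markdown[j - 1] != " ") else arr[j + 1]
--     out = []
--     i = 0
--     while i < n:
--         ch = markdown[i]
--         if ch in ("*", "_") and i + 1 < n and markdown[i + 1] != " ":
--             j = nxt[ch][i + 1]
--             if j < n:
--                 out.append("<i>" + markdown[i + 1 : j] + "</i>")
--                 i = j + 1
--                 continue
--         out.append(ch)
--         i += 1
--     return "".join(out)
-- ===== Notes on version B (the rewrite author's own statement) =====
-- stated objective: faster
-- what changed: A rescans forward from every delimiter for a valid closer (quadratic); B precomputes, in one right-to-left pass per delimiter character, the next valid closing index from each position, so the main pass does O(1) lookups and joins collected pieces.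
import Mathlib
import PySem

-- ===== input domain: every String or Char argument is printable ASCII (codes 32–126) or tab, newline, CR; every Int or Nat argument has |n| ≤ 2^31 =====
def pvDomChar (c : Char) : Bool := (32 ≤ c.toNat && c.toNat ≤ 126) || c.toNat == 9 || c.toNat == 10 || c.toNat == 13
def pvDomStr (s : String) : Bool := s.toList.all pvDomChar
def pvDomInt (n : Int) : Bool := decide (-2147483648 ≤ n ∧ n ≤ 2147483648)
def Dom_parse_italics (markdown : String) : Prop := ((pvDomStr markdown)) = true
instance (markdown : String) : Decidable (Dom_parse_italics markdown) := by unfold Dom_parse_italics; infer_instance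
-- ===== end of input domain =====

-- B replaces A's quadratic rescan for a closing delimiter by a right-to-left
-- precomputed next-valid-closer table with O(1) lookups (objective: faster).

-- ===== PORT A =====
-- A's inner while loop: first j ≥ start with s[j] = c whose predecessor is not a space
-- (slices/indices are always in range here, so List.getD is exact for Python indexing).
def findClose (s : List Char) (c : Char) (j : Nat) : Option Nat :=
  if j < s.length then
    if s.getD j ' ' = c then
      if s.getD (j - 1) ' ' ≠ ' ' then some j
      else findClose s c (j + 1)
    else findClose s c (j + 1)
  else none
termination_by s.length - j

theorem findClose_some_bounds {s : List Char} {c : Char} {j0 j : Nat}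
    (h : findClose s c j0 = some j) : j0 ≤ j ∧ j < s.length := by
  fun_induction findClose s c j0 with
  | case1 j0 hlt hc hsp => simp only [Option.some.injEq] at h; omega
  | case2 j0 hlt hc hsp ih => have := ih h; omega
  | case3 j0 hlt hc ih => have := ih h; omega
  | case4 j0 hlt => simp at h

-- A's outer while loop (result accumulates as the recursion's output prefix).
def loopA (s : List Char) (i : Nat) : List Char :=
  if h : i < s.length then
    let c := s.getD i ' '
    if c = '*' ∨ c = '_' then
      if hv : i + 1 < s.length ∧ s.getD (i + 1) ' ' ≠ ' ' then
        match hfc : findClose s c (i + 1) with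
        | some j =>
            -- markdown[i+1:j] with 0 ≤ i+1 ≤ j ≤ len: take/drop is exact
            "<i>".toList ++ (s.drop (i + 1)).take (j - (i + 1)) ++ "</i>".toList ++ loopA s (j + 1)
        | none => c :: loopA s (i + 1)
      else c :: loopA s (i + 1)
    else c :: loopA s (i + 1)
  else []
termination_by s.length - i
decreasing_by
  · have := findClose_some_bounds hfc; omega
  · omega
  · omega
  · omega

def parse_italics (markdown : String) : String :=
  String.mk (loopA markdown.toList 0)

-- ===== PORT B =====
-- the table nxt[c][j] for j = start..len, built right to left exactly as Source B's
-- downward loop does: element k of (tabFrom s c start) is the value for index start+k.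
def tabFrom (s : List Char) (c : Char) (j : Nat) : List Nat :=
  if j < s.length then
    let rest := tabFrom s c (j + 1)
    (if s.getD j ' ' = c ∧ s.getD (j - 1) ' ' ≠ ' ' then j else rest.headD s.length) :: rest
  else [s.length]
termination_by s.length - j

-- B's main loop; the pieces Source B appends to `out` are the returned list's elements.
-- fuel (= s.length at the call site) only makes the recursion total for arbitrary tables.
def loopB (s : List Char) (tS tU : List Nat) : Nat → Nat → List (List Char)
  | 0, _ => []
  | fuel + 1, i =>
    if i < s.length then
      let ch := s.getD i ' '
      if (ch = '*' ∨ ch = '_') ∧ i + 1 < s.length ∧ s.getD (i + 1) ' ' ≠ ' ' then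
        let j := (if ch = '*' then tS else tU).getD i s.length   -- table index i+1
        if j < s.length then
          ("<i>".toList ++ (s.drop (i + 1)).take (j - (i + 1)) ++ "</i>".toList)
            :: loopB s tS tU fuel (j + 1)
        else [ch] :: loopB s tS tU fuel (i + 1)
      else [ch] :: loopB s tS tU fuel (i + 1)
    else []

-- "".join(out) of the appended pieces = flatten
def parse_italics_alt (markdown : String) : String :=
  let s := markdown.toList
  String.mk ((loopB s (tabFrom s '*' 1) (tabFrom s '_' 1) s.length 0).flatten)

-- ===== PRECONDITION & SPEC =====
def Spec_parse_italics (markdown : String) (out : String) : Prop := out = parse_italics_alt markdown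
instance (markdown : String) (out : String) : Decidable (Spec_parse_italics markdown out) := by unfold Spec_parse_italics; infer_instance

-- ===== CLAIM (what is proved, stated in full; the proofs are below) =====
def Claim_equal_parse_italics : Prop := ∀ (markdown : String), Dom_parse_italics markdown → Spec_parse_italics markdown (parse_italics markdown)

-- ===== LEMMAS AND PROOFS =====

-- specification of both the scan and the table: first valid closer at or after j
def firstValid (s : List Char) (c : Char) (j : Nat) : Nat :=
  if j < s.length then
    if s.getD j ' ' = c ∧ s.getD (j - 1) ' ' ≠ ' ' then j else firstValid s c (j + 1)
  else s.length
termination_by s.length - j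

theorem firstValid_ge (s : List Char) (c : Char) (j : Nat) (hj : j ≤ s.length) :
    j ≤ firstValid s c j := by
  fun_induction firstValid s c j with
  | case1 j hlt hc => omega
  | case2 j hlt hc ih => have := ih (by omega); omega
  | case3 j hlt => omega

theorem findClose_eq (s : List Char) (c : Char) (j : Nat) :
    findClose s c j = if firstValid s c j < s.length then some (firstValid s c j) else none := by
  fun_induction findClose s c j with
  | case1 j hlt hc hsp =>
      have h : firstValid s c j = j := by rw [firstValid, if_pos hlt, if_pos ⟨hc, hsp⟩]
      rw [h, if_pos hlt]
  | case2 j hlt hc hsp ih =>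
      have h : firstValid s c j = firstValid s c (j + 1) := by
        rw [firstValid, if_pos hlt, if_neg (by tauto)]
      rw [h]; exact ih
  | case3 j hlt hc ih =>
      have h : firstValid s c j = firstValid s c (j + 1) := by
        rw [firstValid, if_pos hlt, if_neg (by tauto)]
      rw [h]; exact ih
  | case4 j hlt =>
      have h : firstValid s c j = s.length := by rw [firstValid, if_neg hlt]
      rw [h]; simp

theorem tabFrom_getD (s : List Char) (c : Char) (j : Nat) :
    ∀ k, j + k ≤ s.length → (tabFrom s c j).getD k s.length = firstValid s c (j + k) := by
  fun_induction tabFrom s c j with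
  | case1 j hlt rest ih =>
      intro k hk
      cases k with
      | zero =>
          simp only [Nat.add_zero] at hk ⊢
          simp only [rest, List.getD_cons_zero]
          rw [firstValid, if_pos hlt]
          by_cases hc : s.getD j ' ' = c ∧ s.getD (j - 1) ' ' ≠ ' '
          · rw [if_pos hc, if_pos hc]
          · rw [if_neg hc, if_neg hc]
            have h1 : (tabFrom s c (j + 1)).headD s.length
                = (tabFrom s c (j + 1)).getD 0 s.length := by
              cases tabFrom s c (j + 1) <;> simp
            rw [h1, ih 0 (by omega)]
      | succ k =>
          simp only [rest, List.getD_cons_succ]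
          rw [ih k (by omega)]
          congr 1
          omega
  | case2 j hlt =>
      intro k hk
      have hk0 : k = 0 := by omega
      subst hk0
      simp only [Nat.add_zero] at hk ⊢
      rw [firstValid, if_neg hlt]
      simp

theorem loop_eq (s : List Char) :
    ∀ fuel i, s.length - i ≤ fuel →
      loopA s i = (loopB s (tabFrom s '*' 1) (tabFrom s '_' 1) fuel i).flatten := by
  intro fuel
  induction fuel with
  | zero =>
      intro i hi
      rw [loopA, loopB]
      have : ¬ i < s.length := by omega
      simp [this]
  | succ fuel ih =>
      intro i hi
      rw [loopA, loopB]
      by_cases h : i < s.length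
      · simp only [h, dif_pos, if_pos]
        set c := s.getD i ' ' with hc
        by_cases hdelim : c = '*' ∨ c = '_'
        · rw [if_pos hdelim]
          by_cases hv : i + 1 < s.length ∧ s.getD (i + 1) ' ' ≠ ' '
          · have htab : (if c = '*' then tabFrom s '*' 1 else tabFrom s '_' 1).getD i s.length
                = firstValid s c (i + 1) := by
              rcases hdelim with h1 | h1
              · rw [if_pos h1, tabFrom_getD s '*' 1 i (by omega), h1]
                congr 1
                omega
              · have hne : c ≠ '*' := by rw [h1]; decide
                rw [if_neg hne, tabFrom_getD s '_' 1 i (by omega), h1]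
                congr 1
                omega
            rw [dif_pos hv, if_pos (And.intro hdelim hv)]
            simp only [htab]
            split
            · rename_i j heq
              rw [findClose_eq] at heq
              by_cases hfv : firstValid s c (i + 1) < s.length
              · rw [if_pos hfv] at heq
                have hj : j = firstValid s c (i + 1) := by
                  exact (Option.some.injEq _ _ ▸ heq.symm)
                subst hj
                have hge := firstValid_ge s c (i + 1) (by omega)
                rw [if_pos hfv]
                rw [List.flatten_cons]
                rw [ih (firstValid s c (i + 1) + 1) (by omega)]
              · rw [if_neg hfv] at heq
                exact absurd heq (by simp)
            · rename_i heq
              rw [findClose_eq] at heq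
              by_cases hfv : firstValid s c (i + 1) < s.length
              · rw [if_pos hfv] at heq
                exact absurd heq (by simp)
              · rw [if_neg hfv, List.flatten_cons, ih (i + 1) (by omega)]
                simp
          · rw [dif_neg hv, if_neg (fun hcon => hv hcon.2), List.flatten_cons,
                ih (i + 1) (by omega)]
            simp
        · rw [if_neg hdelim, if_neg (fun hcon => hdelim hcon.1), List.flatten_cons,
              ih (i + 1) (by omega)]
          simp
      · simp [h]

-- ===== VERDICT (by name: the statement is the Claim_ definition above) =====
theorem parse_italics_spec : Claim_equal_parse_italics := by
  intro markdown _
  unfold Spec_parse_italics parse_italics parse_italics_alt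
  rw [loop_eq markdown.toList markdown.toList.length 0 (by omega)]
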